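-- pv_equiv track=rewrite | github.com/sameerSyedNadeem/First-Programming-Project-LOGIC-DOTS | supporting work/thebeauty.py | atPlace
-- ===== SOURCE A (Python) =====
-- def getPositions(board,color):
--     pos=[]
--     for i in range(len(board)):
--         for j in range(len(board[i])):
--             if board[i][j] == color:
--                 pos.append((i,j))
--     return pos
--
-- def atPlace(board, color, row, col, isTrue=True):
--     pos1 = getPositions(board, color)
--     r = 0
--     c = 0
--     if isTrue != False:
--         if row == 'top':
--             r = 0
--         if row == 'middle':
--             r = 1
--         if row == 'bottom':
--             r = 2
--         if col == 'left':
--             c = 0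
--         if col == 'middle':
--             c = 1
--         if col == 'right':
--             c = 2
--         posg = (r, c)
--         for i in range(len(pos1)):
--             if pos1[i] == posg:
--                 return True
--         else:
--             return False
--     else:
--         return not atPlace(board, color, row, col)
-- ===== SOURCE B (Python) =====
-- def atPlace(board, color, row, col, isTrue=True):
--     r = {'top': 0, 'middle': 1, 'bottom': 2}.get(row, 0)
--     c = {'left': 0, 'middle': 1, 'right': 2}.get(col, 0)
--     hit = r < len(board) and c < len(board[r]) and board[r][c] == color
--     return hit if isTrue else not hit
-- ===== Notes on version B (the rewrite author's own statement) =====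
-- stated objective: simpler
-- what changed: B maps row/col names to indices with dict lookups and does one bounds-checked direct cell access, instead of scanning the whole board to build the list of all positions of the color and then scanning that list; the isTrue=False recursion becomes a negation of the single check.
import Mathlib
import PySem

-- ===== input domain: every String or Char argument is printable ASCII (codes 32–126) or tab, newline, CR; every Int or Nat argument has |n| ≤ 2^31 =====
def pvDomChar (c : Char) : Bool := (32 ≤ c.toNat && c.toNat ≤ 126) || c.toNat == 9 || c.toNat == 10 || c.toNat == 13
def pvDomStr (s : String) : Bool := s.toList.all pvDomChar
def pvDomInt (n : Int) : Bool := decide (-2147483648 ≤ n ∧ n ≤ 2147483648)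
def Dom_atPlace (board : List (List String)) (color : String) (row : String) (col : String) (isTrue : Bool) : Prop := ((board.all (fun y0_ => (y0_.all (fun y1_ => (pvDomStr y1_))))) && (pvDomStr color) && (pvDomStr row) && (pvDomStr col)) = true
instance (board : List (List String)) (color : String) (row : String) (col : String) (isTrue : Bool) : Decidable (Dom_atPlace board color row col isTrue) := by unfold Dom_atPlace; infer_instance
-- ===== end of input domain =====

-- B replaces A's build-all-positions-then-scan with a direct bounds-checked cell lookup
-- (and negation instead of recursion for isTrue=False); objective: simpler (one direct lookup instead of a build-then-scan).

-- ===== PORT A =====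
-- getPositions: nested index loops collecting (i, j) of every cell equal to color
def getPositionsA (board : List (List String)) (color : String) : List (Int × Int) :=
  (PySem.List.pyRange 0 board.length 1).foldl
    (fun pos i =>
      (PySem.List.pyRange 0 (PySem.List.pyGetD board i []).length 1).foldl
        (fun pos j =>
          if PySem.List.pyGetD (PySem.List.pyGetD board i []) j "" == color
          then pos ++ [(i, j)] else pos)
        pos)
    []

-- the 'for i in range(len(pos1)): if pos1[i] == posg: return True / else: return False' scan
def scanA : List (Int × Int) → Int × Int → Bool
  | [], _ => false
  | p :: rest, g => if p == g then true else scanA rest g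

def atPlace (board : List (List String)) (color : String) (row : String) (col : String) (isTrue : Bool) : Bool :=
  let pos1 := getPositionsA board color
  if h : isTrue != false then
    let r : Int := 0
    let r := if row == "top" then 0 else r
    let r := if row == "middle" then 1 else r
    let r := if row == "bottom" then 2 else r
    let c : Int := 0
    let c := if col == "left" then 0 else c
    let c := if col == "middle" then 1 else c
    let c := if col == "right" then 2 else c
    scanA pos1 (r, c)
  else
    !(atPlace board color row col true)
termination_by (if isTrue then 0 else 1)
decreasing_by simp_all

-- ===== PORT B =====
def atPlace_alt (board : List (List String)) (color : String) (row : String) (col : String) (isTrue : Bool) : Bool :=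
  let r : Int := PySem.Dict.getD (PySem.Dict.ofList [("top", (0 : Int)), ("middle", 1), ("bottom", 2)]) row 0
  let c : Int := PySem.Dict.getD (PySem.Dict.ofList [("left", (0 : Int)), ("middle", 1), ("right", 2)]) col 0
  -- 'r < len(board) and c < len(board[r]) and board[r][c] == color' (r, c are always ≥ 0,
  -- so pyGetD with its default matches Python's short-circuited guarded indexing exactly)
  let hit := decide (r < (board.length : Int)) &&
             decide (c < ((PySem.List.pyGetD board r []).length : Int)) &&
             (PySem.List.pyGetD (PySem.List.pyGetD board r []) c "" == color)
  if isTrue then hit else !hit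

-- ===== PRECONDITION & SPEC =====
def Spec_atPlace (board : List (List String)) (color : String) (row : String) (col : String) (isTrue : Bool) (out : Bool) : Prop := out = atPlace_alt board color row col isTrue
instance (board : List (List String)) (color : String) (row : String) (col : String) (isTrue : Bool) (out : Bool) : Decidable (Spec_atPlace board color row col isTrue out) := by unfold Spec_atPlace; infer_instance

-- ===== CLAIM (what is proved, stated in full; the proofs are below) =====
def Claim_equal_atPlace : Prop := ∀ (board : List (List String)) (color : String) (row : String) (col : String) (isTrue : Bool), Dom_atPlace board color row col isTrue → Spec_atPlace board color row col isTrue (atPlace board color row col isTrue)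

-- ===== LEMMAS AND PROOFS =====

theorem scanA_eq_contains (pos : List (Int × Int)) (g : Int × Int) :
    scanA pos g = decide (g ∈ pos) := by
  induction pos with
  | nil => rfl
  | cons p rest ih =>
      rw [scanA]
      by_cases h : p = g
      · subst h; simp
      · simp [h, ih, Ne.symm h]

theorem getPositionsA_eq_flatMap (board : List (List String)) (color : String) :
    getPositionsA board color =
      (PySem.List.pyRange 0 board.length 1).flatMap (fun i =>
        ((PySem.List.pyRange 0 (PySem.List.pyGetD board i []).length 1).filter (fun j =>
            PySem.List.pyGetD (PySem.List.pyGetD board i []) j "" == color)).map (fun j => (i, j))) := by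
  unfold getPositionsA
  simp only [PySem.List.foldl_append_if, PySem.List.foldl_append_eq_flatMap, List.nil_append]

theorem mem_getPositionsA (board : List (List String)) (color : String) (r c : Int) :
    (r, c) ∈ getPositionsA board color ↔
      (0 ≤ r ∧ r < (board.length : Int) ∧ 0 ≤ c ∧ c < ((PySem.List.pyGetD board r []).length : Int) ∧
        PySem.List.pyGetD (PySem.List.pyGetD board r []) c "" = color) := by
  rw [getPositionsA_eq_flatMap]
  simp only [List.mem_flatMap, List.mem_map, List.mem_filter, PySem.List.mem_pyRange_one]
  constructor
  · rintro ⟨i, ⟨hi0, hin⟩, j, ⟨⟨hj0, hjn⟩, hcell⟩, heq⟩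
    obtain ⟨rfl, rfl⟩ := Prod.mk.injEq .. ▸ heq
    exact ⟨hi0, hin, hj0, hjn, by simpa using hcell⟩
  · rintro ⟨hr0, hrn, hc0, hcn, hcell⟩
    exact ⟨r, ⟨hr0, hrn⟩, c, ⟨⟨hc0, hcn⟩, by simpa using hcell⟩, rfl⟩

-- the scan over all positions equals the direct bounds-checked lookup, for nonnegative indices
theorem scan_eq_lookup (board : List (List String)) (color : String) (r c : Int)
    (hr : 0 ≤ r) (hc : 0 ≤ c) :
    scanA (getPositionsA board color) (r, c) =
      (decide (r < (board.length : Int)) &&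
       decide (c < ((PySem.List.pyGetD board r []).length : Int)) &&
       (PySem.List.pyGetD (PySem.List.pyGetD board r []) c "" == color)) := by
  rw [scanA_eq_contains]
  by_cases hmem : (r, c) ∈ getPositionsA board color
  · obtain ⟨_, h1, _, h2, h3⟩ := (mem_getPositionsA board color r c).1 hmem
    simp [hmem, h1, h2, h3]
  · have hnot := (not_iff_not.2 (mem_getPositionsA board color r c)).1 hmem
    rcases lt_or_ge r (board.length : Int) with h1 | h1
    · rcases lt_or_ge c ((PySem.List.pyGetD board r []).length : Int) with h2 | h2
      · have h3 : PySem.List.pyGetD (PySem.List.pyGetD board r []) c "" ≠ color := by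
          intro h; exact hnot ⟨hr, h1, hc, h2, h⟩
        simp [hmem, h1, h2, beq_eq_false_iff_ne.2 h3]
      · simp [hmem, not_lt.2 h2]
    · simp [hmem, not_lt.2 h1]

-- A's if-chain row/col index equals B's dict lookup
theorem row_index_eq (row : String) :
    PySem.Dict.getD (PySem.Dict.ofList [("top", (0 : Int)), ("middle", 1), ("bottom", 2)]) row 0 =
      (if row == "bottom" then 2 else if row == "middle" then 1 else if row == "top" then 0 else (0 : Int)) := by
  have hof : PySem.Dict.ofList [("top", (0 : Int)), ("middle", 1), ("bottom", 2)] =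
      PySem.Dict.mk [("top", 0), ("middle", 1), ("bottom", 2)] := by rfl
  by_cases h1 : row = "top"
  · subst h1; decide
  · by_cases h2 : row = "middle"
    · subst h2; decide
    · by_cases h3 : row = "bottom"
      · subst h3; decide
      · simp [hof, PySem.Dict.getD_eq_get?_getD, PySem.Dict.get?,
          Ne.symm h1, Ne.symm h2, Ne.symm h3, h1, h2, h3]

theorem col_index_eq (col : String) :
    PySem.Dict.getD (PySem.Dict.ofList [("left", (0 : Int)), ("middle", 1), ("right", 2)]) col 0 =
      (if col == "right" then 2 else if col == "middle" then 1 else if col == "left" then 0 else (0 : Int)) := by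
  have hof : PySem.Dict.ofList [("left", (0 : Int)), ("middle", 1), ("right", 2)] =
      PySem.Dict.mk [("left", 0), ("middle", 1), ("right", 2)] := by rfl
  by_cases h1 : col = "left"
  · subst h1; decide
  · by_cases h2 : col = "middle"
    · subst h2; decide
    · by_cases h3 : col = "right"
      · subst h3; decide
      · simp [hof, PySem.Dict.getD_eq_get?_getD, PySem.Dict.get?,
          Ne.symm h1, Ne.symm h2, Ne.symm h3, h1, h2, h3]

theorem atPlace_true_eq (board : List (List String)) (color : String) (row : String) (col : String) :
    atPlace board color row col true = atPlace_alt board color row col true := by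
  rw [atPlace]
  simp only [atPlace_alt, bne_iff_ne, ne_eq, Bool.true_eq_false, not_false_eq_true,
    dite_true, if_true, row_index_eq, col_index_eq]
  have hr : (0 : Int) ≤ (if row == "bottom" then 2 else if row == "middle" then 1 else if row == "top" then 0 else (0 : Int)) := by
    split_ifs <;> norm_num
  have hc : (0 : Int) ≤ (if col == "right" then 2 else if col == "middle" then 1 else if col == "left" then 0 else (0 : Int)) := by
    split_ifs <;> norm_num
  rw [scan_eq_lookup _ _ _ _ hr hc]

-- ===== VERDICT (by name: the statement is the Claim_ definition above) =====
theorem atPlace_spec : Claim_equal_atPlace := by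
  intro board color row col isTrue _
  unfold Spec_atPlace
  cases isTrue with
  | true => exact atPlace_true_eq board color row col
  | false =>
      rw [atPlace]
      simp only [bne_self_eq_false, Bool.false_eq_true, dite_false]
      rw [atPlace_true_eq board color row col]
      simp [atPlace_alt]
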